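-- pv_equiv track=rewrite | github.com/leaagithub/HackDavis2019 | DNA sequence simulator.py | unit_repeat
-- ===== SOURCE A (Python) =====
-- def unit_repeat(unit_list): # Generate a list of all repeated possibilities from the unit sequence
--     sequence_list = []
--     for unit in unit_list:
--
--         child_list = []
--         for i in range (5, 51): # SSR repeat 5-50 times
--             sequence = unit*i
--             child_list.append(sequence)
--         sequence_list += child_list
--     return sequence_list
-- ===== SOURCE B (Python) =====
-- def unit_repeat(unit_list):
--     # Stage 1: build each unit's maximal 50x repeat once, with its unit length.
--     fulls = [(u * 50, len(u)) for u in unit_list]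
--     # Stage 2: every i-fold repeat (5 <= i <= 50) is a prefix of the maximal one.
--     return [full[:i * step] for (full, step) in fulls for i in range(5, 51)]
-- ===== Notes on version B (the rewrite author's own statement) =====
-- stated objective: alternative
-- what changed: Instead of recomputing unit*i for every repeat count, B precomputes the maximal 50x repeat of each unit in one staged pass and then produces each i-fold repeat as a prefix slice full[:i*len(unit)] of that one string, via a flat comprehension instead of nested append loops.
import Mathlib
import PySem

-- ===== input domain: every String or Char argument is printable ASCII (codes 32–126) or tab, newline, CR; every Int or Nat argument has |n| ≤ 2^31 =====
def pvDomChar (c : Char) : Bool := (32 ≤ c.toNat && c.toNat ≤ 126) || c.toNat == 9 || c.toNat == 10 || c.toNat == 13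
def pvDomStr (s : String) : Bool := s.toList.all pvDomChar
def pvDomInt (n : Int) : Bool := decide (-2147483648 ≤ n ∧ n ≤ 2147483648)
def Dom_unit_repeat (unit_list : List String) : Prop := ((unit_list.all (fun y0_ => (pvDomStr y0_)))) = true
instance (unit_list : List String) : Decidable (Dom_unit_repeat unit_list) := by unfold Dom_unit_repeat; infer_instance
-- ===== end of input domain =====

-- B precomputes each unit's maximal 50x repeat once (staged pass) and reads every
-- i-fold repeat off it as a prefix slice, instead of multiplying unit*i per count (objective: alternative).

-- shared helper: Python's `s * n` (string repetition)
def rep (s : String) : Nat → String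
  | 0 => ""
  | n+1 => rep s n ++ s

-- ===== PORT A =====
def unit_repeat (unit_list : List String) : List String :=
  unit_list.foldl (fun sequence_list unit =>
    sequence_list ++
      ((PySem.List.pyRange 5 51 1).foldl
        (fun child_list i => child_list ++ [rep unit i.toNat]) [])) []

-- ===== PORT B =====
def unit_repeat_alt (unit_list : List String) : List String :=
  (unit_list.map (fun u => (rep u 50, PySem.Str.len u))).flatMap (fun fl =>
    (PySem.List.pyRange 5 51 1).map (fun i => PySem.Str.slice fl.1 none (some (i * fl.2))))

-- ===== PRECONDITION & SPEC =====
def Spec_unit_repeat (unit_list : List String) (out : List String) : Prop := out = unit_repeat_alt unit_list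
instance (unit_list : List String) (out : List String) : Decidable (Spec_unit_repeat unit_list out) := by unfold Spec_unit_repeat; infer_instance

-- ===== CLAIM (what is proved, stated in full; the proofs are below) =====
def Claim_equal_unit_repeat : Prop := ∀ (unit_list : List String), Dom_unit_repeat unit_list → Spec_unit_repeat unit_list (unit_repeat unit_list)

-- ===== LEMMAS AND PROOFS =====

-- list-level repetition, matching rep on toList
def repL {α : Type} (l : List α) : Nat → List α
  | 0 => []
  | n+1 => repL l n ++ l

theorem toList_rep (u : String) : ∀ n, (rep u n).toList = repL u.toList n := by
  intro n
  induction n with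
  | zero => rfl
  | succ n ih => simp [rep, repL, String.toList_append, ih]

theorem repL_add {α : Type} (l : List α) (a b : Nat) :
    repL l (a + b) = repL l a ++ repL l b := by
  induction b with
  | zero => simp [repL]
  | succ b ih => simp [repL, ih]

theorem length_repL {α : Type} (l : List α) : ∀ n, (repL l n).length = n * l.length := by
  intro n
  induction n with
  | zero => simp [repL]
  | succ n ih => simp [repL, ih, Nat.succ_mul]

-- the i-fold repeat is the (i*len)-prefix of the 50-fold one (i ≤ 50)
theorem slice_rep (u : String) (i : Nat) (hi : i ≤ 50) :
    PySem.Str.slice (rep u 50) none (some ((i : Int) * PySem.Str.len u)) = rep u i := by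
  apply String.toList_inj.mp
  rw [PySem.Str.toList_slice, PySem.Chars.slice_eq_listSlice]
  have hlen : (i : Int) * PySem.Str.len u = ((i * u.toList.length : Nat) : Int) := by
    simp [PySem.Str.len]
  rw [hlen, PySem.List.slice_to_natCast]
  rw [toList_rep, toList_rep]
  have : (50 : Nat) = i + (50 - i) := by omega
  rw [this, repL_add]
  exact List.take_left' (length_repL u.toList i)

-- A's inner foldl-append is a map
theorem foldl_app_map {α β : Type} (f : α → β) :
    ∀ (l : List α) (acc : List β),
      l.foldl (fun a x => a ++ [f x]) acc = acc ++ l.map f := by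
  intro l
  induction l with
  | nil => simp
  | cons x t ih => intro acc; simp [ih]

-- per-unit blocks agree
theorem block_eq (u : String) :
    ((PySem.List.pyRange 5 51 1).foldl
      (fun child_list i => child_list ++ [rep u i.toNat]) [])
    = (PySem.List.pyRange 5 51 1).map (fun i => PySem.Str.slice (rep u 50) none (some (i * PySem.Str.len u))) := by
  rw [foldl_app_map, List.nil_append]
  apply List.map_congr_left
  intro i hi
  have hr : PySem.List.pyRange 5 51 1 = (List.range 46).map (fun j => ((5 + j : Nat) : Int)) := by
    decide
  rw [hr] at hi
  obtain ⟨j, hj, rfl⟩ := List.mem_map.mp hi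
  have hj46 : j < 46 := List.mem_range.mp hj
  rw [slice_rep u (5 + j) (by omega)]
  congr 1

theorem unit_repeat_spec : Claim_equal_unit_repeat := by
  intro ul h
  clear h
  unfold Spec_unit_repeat unit_repeat unit_repeat_alt
  rw [PySem.List.foldl_append_eq_flatMap, List.nil_append]
  induction ul with
  | nil => rfl
  | cons u t ih =>
      simp only [List.map_cons, List.flatMap_cons, ih]
      
      rw [block_eq u]
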